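-- pv_equiv track=rewrite | github.com/m0ssse/AoC_2023 | day11.py | find_row_offsets
-- ===== SOURCE A (Python) =====
-- def is_blank_row(grid, i):
--     for char in grid[i]:
--         if char=="#":
--             return False
--     return True
--
-- def find_row_offsets(grid, offset):
--     n=len(grid)
--     res=[0]*n
--     for i in range(1, n):
--         if is_blank_row(grid, i-1):
--             res[i]=offset+res[i-1]
--         else:
--             res[i]=res[i-1]
--     return res
-- ===== SOURCE B (Python) =====
-- def find_row_offsets(grid, offset):
--     # Run-length construction: list the blank-row indices, then emit constant
--     # blocks k*offset between consecutive blanks (closed form, no prefix adds).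
--     blanks = [i for i, row in enumerate(grid) if '#' not in row]
--     res = []
--     prev = 0
--     for k, b in enumerate(blanks):
--         res.extend([k * offset] * (b + 1 - prev))
--         prev = b + 1
--     res.extend([len(blanks) * offset] * (len(grid) - prev))
--     return res
-- ===== Notes on version B (the rewrite author's own statement) =====
-- stated objective: alternative
-- what changed: Instead of A's per-index prefix-sum loop (res[i]=res[i-1]+maybe offset via a char-scanning helper), B first collects the blank-row indices and then builds the output as constant run-length blocks whose value is the closed form k*offset between consecutive blank rows.
import Mathlib
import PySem

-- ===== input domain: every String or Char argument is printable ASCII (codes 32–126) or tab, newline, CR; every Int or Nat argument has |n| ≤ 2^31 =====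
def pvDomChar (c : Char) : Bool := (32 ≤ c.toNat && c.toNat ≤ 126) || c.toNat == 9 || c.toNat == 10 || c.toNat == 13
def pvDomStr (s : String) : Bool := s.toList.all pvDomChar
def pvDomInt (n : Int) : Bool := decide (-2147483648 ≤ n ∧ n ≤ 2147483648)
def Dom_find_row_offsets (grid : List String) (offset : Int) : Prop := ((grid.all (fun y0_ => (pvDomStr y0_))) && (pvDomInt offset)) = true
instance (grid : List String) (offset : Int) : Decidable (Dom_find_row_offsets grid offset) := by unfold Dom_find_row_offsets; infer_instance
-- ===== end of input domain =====

-- B replaces A's per-index prefix-sum loop by run-length construction from the list of blank-row indices (closed-form block values k*offset); equivalence of return values is proved on the whole domain.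

-- ===== PORT A =====
-- 'for char in grid[i]: if char == "#": return False / return True'
def is_blank_row_chars : List Char → Bool
  | [] => true
  | c :: cs => if c = '#' then false else is_blank_row_chars cs

-- grid[i]: inside A's loop i = 0..n-2 is always in range, so the default "" is never used
def is_blank_row (grid : List String) (i : Int) : Bool :=
  is_blank_row_chars (PySem.List.pyGetD grid i "").toList

-- res[i] = … for i in range(1, n): i is always in [1, n), so set i.toNat / pyGetD (i-1) are exact
def find_row_offsets (grid : List String) (offset : Int) : List Int :=
  let n : Int := grid.length
  let res : List Int := List.replicate grid.length 0
  (PySem.List.pyRange 1 n 1).foldl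
    (fun res i =>
      if is_blank_row grid (i - 1) then
        res.set i.toNat (offset + PySem.List.pyGetD res (i - 1) 0)
      else
        res.set i.toNat (PySem.List.pyGetD res (i - 1) 0))
    res

-- ===== PORT B =====
-- blanks = [i for i, row in enumerate(grid) if '#' not in row]  (single-char substring test = char membership)
-- then run-length emission: res.extend([k*offset]*(b+1-prev)); final pad with len(blanks)*offset.
-- Lean zipIdx pairs are (elem, index), so p.1 is the blank index b and p.2 the enumerate counter k.
def find_row_offsets_alt (grid : List String) (offset : Int) : List Int :=
  let blanks : List Nat :=
    ((grid.zipIdx).filter (fun p => !(p.1.toList.contains '#'))).map (fun p => p.2)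
  let st := (blanks.zipIdx).foldl
    (fun (st : List Int × Nat) (p : Nat × Nat) =>
      (st.1 ++ List.replicate (p.1 + 1 - st.2) ((p.2 : Int) * offset), p.1 + 1))
    ([], 0)
  st.1 ++ List.replicate (grid.length - st.2) ((blanks.length : Int) * offset)

-- ===== PRECONDITION & SPEC =====
def Spec_find_row_offsets (grid : List String) (offset : Int) (out : List Int) : Prop := out = find_row_offsets_alt grid offset
instance (grid : List String) (offset : Int) (out : List Int) : Decidable (Spec_find_row_offsets grid offset out) := by unfold Spec_find_row_offsets; infer_instance

-- ===== CLAIM (what is proved, stated in full; the proofs are below) =====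
def Claim_equal_find_row_offsets : Prop := ∀ (grid : List String) (offset : Int), Dom_find_row_offsets grid offset → Spec_find_row_offsets grid offset (find_row_offsets grid offset)

-- ===== LEMMAS AND PROOFS =====

-- increment of row r
def pvContrib (offset : Int) (r : String) : Int :=
  if r.toList.contains '#' then 0 else offset

-- running-total prefix sums (reference form for A's array)
def pvAccum : Int → List Int → List Int
  | _, [] => []
  | total, c :: cs => (total + c) :: pvAccum (total + c) cs

-- common reference: res[0]=t, res[i+1]=res[i]+contrib(row i)
def pvRun (offset t : Int) : List String → List Int
  | [] => []
  | r :: rs => t :: pvRun offset (t + pvContrib offset r) rs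

lemma is_blank_row_chars_eq (cs : List Char) : is_blank_row_chars cs = !cs.contains '#' := by
  induction cs with
  | nil => rfl
  | cons c cs ih =>
    by_cases h : c = '#' <;> simp [is_blank_row_chars, h, ih, eq_comm]

lemma pvAccum_append (t : Int) (xs ys : List Int) :
    pvAccum t (xs ++ ys) = pvAccum t xs ++ pvAccum (t + xs.sum) ys := by
  induction xs generalizing t with
  | nil => simp [pvAccum]
  | cons x xs ih => simp [pvAccum, ih, add_assoc]

lemma pvAccum_length (t : Int) (xs : List Int) : (pvAccum t xs).length = xs.length := by
  induction xs generalizing t with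
  | nil => rfl
  | cons x xs ih => simp [pvAccum, ih]

lemma pvAccum_last_getD (t : Int) (xs : List Int) :
    (t :: pvAccum t xs).getD xs.length 0 = t + xs.sum := by
  induction xs generalizing t with
  | nil => simp
  | cons x xs ih => simpa [pvAccum, add_assoc] using ih (t + x)

-- A's loop invariant: after processing range(1, k) the array is the accumulated
-- prefix for the first k positions followed by untouched zeros.
lemma loop_inv (grid : List String) (offset : Int) (k : Nat) (hk : 1 ≤ k)
    (hkn : k ≤ grid.length) :
    (PySem.List.pyRange 1 (k : Int) 1).foldl
      (fun res i =>
        if is_blank_row grid (i - 1) then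
          res.set i.toNat (offset + PySem.List.pyGetD res (i - 1) 0)
        else
          res.set i.toNat (PySem.List.pyGetD res (i - 1) 0))
      (List.replicate grid.length 0)
    = (0 :: pvAccum 0 ((grid.take (k - 1)).map (pvContrib offset)))
        ++ List.replicate (grid.length - k) 0 := by
  induction k with
  | zero => omega
  | succ k ih =>
    rcases Nat.eq_or_lt_of_le hk with h1 | h1
    · -- k + 1 = 1 : empty range, array untouched
      have hk0 : k = 0 := by omega
      subst hk0
      have hc1 : ((0 + 1 : Nat) : Int) = 1 := by norm_num
      rw [hc1, PySem.List.pyRange_one_eq_nil le_rfl]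
      simp only [List.foldl_nil]
      have hn : 1 ≤ grid.length := hkn
      obtain ⟨r, rs, hg⟩ : ∃ r rs, grid = r :: rs := by
        cases grid with
        | nil => simp at hn
        | cons a l => exact ⟨a, l, rfl⟩
      subst hg
      simp only [List.length_cons, List.take_zero, List.map_nil, pvAccum, Nat.add_sub_cancel,
        List.singleton_append]
      exact List.replicate_succ
    · -- k ≥ 1 : split off the last index k
      have hk1 : 1 ≤ k := by omega
      have hkn' : k ≤ grid.length := by omega
      have hsplit : PySem.List.pyRange 1 ((k : Int) + 1) 1
          = PySem.List.pyRange 1 (k : Int) 1 ++ [(k : Int)] :=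
        PySem.List.pyRange_one_succ_right (by exact_mod_cast hk1)
      have hcast : ((k + 1 : Nat) : Int) = (k : Int) + 1 := by norm_num
      rw [hcast, hsplit, List.foldl_append, ih hk1 hkn']
      set pre := (grid.take (k - 1)).map (pvContrib offset) with hpre
      have hlenpre : pre.length = k - 1 := by
        simp [hpre, List.length_take]; omega
      -- the row examined at step k
      obtain ⟨r, hr⟩ : ∃ r, grid[k - 1]? = some r :=
        ⟨grid[k-1]'(by omega), List.getElem?_eq_getElem (by omega)⟩
      have hi1 : ((k : Int) - 1) = ((k - 1 : Nat) : Int) := by omega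
      -- grid lookup in is_blank_row
      have hgetgrid : PySem.List.pyGetD grid ((k : Int) - 1) "" = r := by
        rw [hi1, PySem.List.pyGetD_natCast]
        simp [List.getD, hr]
      -- array lookup res[k-1] = running total
      have hlenL : (0 :: pvAccum 0 pre).length = k := by
        simp [pvAccum_length, hlenpre]; omega
      have hS : PySem.List.pyGetD
          ((0 :: pvAccum 0 pre) ++ List.replicate (grid.length - k) 0)
          ((k : Int) - 1) 0 = 0 + pre.sum := by
        rw [hi1, PySem.List.pyGetD_natCast]
        have hlt : k - 1 < (0 :: pvAccum 0 pre).length := by omega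
        rw [List.getD, List.getElem?_append_left hlt]
        have := pvAccum_last_getD 0 pre
        rw [hlenpre] at this
        simpa [List.getD] using this
      -- the write res[k] = v
      have hset : ∀ v : Int,
          (((0 :: pvAccum 0 pre) ++ List.replicate (grid.length - k) 0).set k v)
          = (0 :: pvAccum 0 pre) ++ v :: List.replicate (grid.length - (k + 1)) 0 := by
        intro v
        have hrep : List.replicate (grid.length - k) (0 : Int)
            = 0 :: List.replicate (grid.length - (k + 1)) 0 := by
          have : grid.length - k = (grid.length - (k + 1)) + 1 := by omega
          rw [this, List.replicate_succ]
        rw [hrep, List.set_append_right _ _ (by omega)]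
        simp [hlenL]
      have htake : grid.take ((k + 1) - 1) = grid.take (k - 1) ++ [r] := by
        have h1' : (k + 1) - 1 = (k - 1) + 1 := by omega
        rw [h1', List.take_add_one, hr]
        rfl
      have hblank : is_blank_row grid ((k : Int) - 1) = !r.toList.contains '#' := by
        rw [is_blank_row, hgetgrid, is_blank_row_chars_eq]
      -- put it together
      simp only [List.foldl_cons, List.foldl_nil]
      have htoNat : (k : Int).toNat = k := Int.toNat_natCast k
      rw [hblank]
      by_cases hc : '#' ∈ r.toList
      · rw [if_neg (by simp [hc]), hS, htoNat, hset, htake, List.map_append, ← hpre,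
          pvAccum_append]
        simp [pvAccum, pvContrib, hc]
      · rw [if_pos (by simp [hc]), hS, htoNat, hset, htake, List.map_append, ← hpre,
          pvAccum_append]
        simp [pvAccum, pvContrib, hc, add_comm]

-- bridge: the accumulated-prefix form of a nonempty grid is pvRun
lemma pvAccum_eq_pvRun (offset : Int) : ∀ (grid : List String) (t : Int), grid ≠ [] →
    t :: pvAccum t (grid.dropLast.map (pvContrib offset)) = pvRun offset t grid := by
  intro grid
  induction grid with
  | nil => intro t h; exact absurd rfl h
  | cons r rs ih =>
    intro t _
    cases rs with
    | nil => simp [pvAccum, pvRun]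
    | cons r' rs' =>
      have ihh := ih (t + pvContrib offset r) (by simp)
      rw [show pvRun offset t (r :: r' :: rs')
          = t :: pvRun offset (t + pvContrib offset r) (r' :: rs') from rfl, ← ihh]
      simp [pvAccum, List.dropLast_cons_of_ne_nil]

-- B's invariant: folding the run-emission step over the blanks of `grid`
-- (indexed from `base`, enumerate counter from `k`, output so far `res`,
-- previous cut `prev ≤ base`) and padding to the end yields the prefix plus pvRun.
lemma alt_inv (offset : Int) : ∀ (grid : List String) (base prev k : Nat) (res : List Int),
    prev ≤ base →
    (let bs := ((grid.zipIdx base).filter (fun p => !(p.1.toList.contains '#'))).map (fun p => p.2);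
     let st := (bs.zipIdx k).foldl
       (fun (st : List Int × Nat) (p : Nat × Nat) =>
         (st.1 ++ List.replicate (p.1 + 1 - st.2) ((p.2 : Int) * offset), p.1 + 1))
       (res, prev);
     st.1 ++ List.replicate (base + grid.length - st.2) (((k + bs.length : Nat) : Int) * offset))
    = res ++ List.replicate (base - prev) ((k : Int) * offset)
        ++ pvRun offset ((k : Int) * offset) grid := by
  intro grid
  induction grid with
  | nil =>
    intro base prev k res hle
    simp [pvRun]
  | cons r rs ih =>
    intro base prev k res hle
    have hrep : List.replicate (base + 1 - prev) ((k : Int) * offset)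
        = List.replicate (base - prev) ((k : Int) * offset) ++ [(k : Int) * offset] := by
      rw [show base + 1 - prev = (base - prev) + 1 by omega, List.replicate_succ']
    by_cases hc : r.toList.contains '#'
    · -- non-blank row: blanks unchanged (indices shift by one)
      have ihh := ih (base + 1) prev k res (by omega)
      simp only [List.zipIdx_cons, List.filter_cons, hc, Bool.not_true, Bool.false_eq_true,
        reduceIte, List.length_cons] at ihh ⊢
      rw [show base + (rs.length + 1) = (base + 1) + rs.length by omega, ihh, hrep]
      have hm : '#' ∈ r.toList := by simpa using hc
      simp [pvRun, pvContrib, hm]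
    · -- blank row at index base: one emission step, then recurse
      have ihh := ih (base + 1) (base + 1) (k + 1)
        (res ++ List.replicate (base + 1 - prev) ((k : Int) * offset)) (le_refl _)
      simp only [Nat.sub_self, List.replicate_zero, List.append_nil] at ihh
      rw [show k + 1 + (((rs.zipIdx (base + 1)).filter (fun p => !(p.1.toList.contains '#'))).map (fun p => p.2)).length
          = k + ((((rs.zipIdx (base + 1)).filter (fun p => !(p.1.toList.contains '#'))).map (fun p => p.2)).length + 1) by omega] at ihh
      simp only [List.zipIdx_cons, List.filter_cons, hc, Bool.not_false, reduceIte,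
        List.map_cons, List.length_cons, List.foldl_cons] at ⊢
      rw [show base + (rs.length + 1) = (base + 1) + rs.length by omega]
      rw [ihh, hrep]
      have hm : '#' ∉ r.toList := by simpa using hc
      rw [show ((k + 1 : Nat) : Int) * offset = (k : Int) * offset + offset by push_cast; ring]
      simp [pvRun, pvContrib, hm]

-- ===== VERDICT (by name: the statement is the Claim_ definition above) =====
theorem find_row_offsets_spec : Claim_equal_find_row_offsets := by
  intro grid offset _
  unfold Spec_find_row_offsets
  have hB : find_row_offsets_alt grid offset = pvRun offset 0 grid := by
    have := alt_inv offset grid 0 0 0 [] (le_refl 0)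
    unfold find_row_offsets_alt
    simpa using this
  cases grid with
  | nil => rw [hB]; rfl
  | cons g gs =>
    have hlen : 1 ≤ (g :: gs).length := by simp
    have hmain := loop_inv (g :: gs) offset (g :: gs).length hlen le_rfl
    rw [hB, ← pvAccum_eq_pvRun offset (g :: gs) 0 (by simp)]
    unfold find_row_offsets
    simp only []
    rw [hmain, Nat.sub_self, List.replicate_zero, List.append_nil, ← List.dropLast_eq_take]
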